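-- pv_equiv track=rewrite | github.com/tuan-cre/Chuyen-De-Python | Chuong 5/cau 6.py | NegativeNumberInStrings
-- ===== SOURCE A (Python) =====
-- def NegativeNumberInStrings(s):
--     negativeNumber = []
--     for i in range(len(s)):
--         if s[i] == "-":
--             number = ""
--             for j in range(i+1, len(s)):
--                 if s[j].isdigit():
--                     number += s[j]
--                 else:
--                     break
--             if number != "":
--                 negativeNumber.append(int(number)*-1)
--     return negativeNumber
-- ===== SOURCE B (Python) =====
-- def NegativeNumberInStrings(s):
--     res = []
--     digits = []  # digit run to the right of the current position, in reverse order
--     for ch in reversed(s):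
--         if ch.isdigit():
--             digits.append(ch)
--         else:
--             if ch == '-' and digits:
--                 res.append(-int(''.join(reversed(digits))))
--             digits = []
--     res.reverse()
--     return res
-- ===== Notes on version B (the rewrite author's own statement) =====
-- stated objective: alternative
-- what changed: B makes a single right-to-left pass keeping the digit run seen so far on an explicit stack and emitting the negated number when it meets the dash, building the output back-to-front, instead of A's left-to-right scan that rescans the digit run after every dash with a nested inner loop (worst-case quadratic).
import Mathlib
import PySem

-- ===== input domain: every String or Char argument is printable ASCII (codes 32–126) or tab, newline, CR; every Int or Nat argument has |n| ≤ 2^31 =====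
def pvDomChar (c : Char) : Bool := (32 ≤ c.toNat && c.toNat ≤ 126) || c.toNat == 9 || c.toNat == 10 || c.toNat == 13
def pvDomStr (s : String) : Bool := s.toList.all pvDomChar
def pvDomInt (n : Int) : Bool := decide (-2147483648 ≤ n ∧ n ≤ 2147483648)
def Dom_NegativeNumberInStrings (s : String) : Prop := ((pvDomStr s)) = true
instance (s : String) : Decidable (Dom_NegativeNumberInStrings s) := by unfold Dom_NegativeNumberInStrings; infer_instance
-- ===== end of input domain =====

-- B replaces A's left-to-right scan with a nested per-dash digit rescan by a single
-- right-to-left pass keeping the current digit run on an explicit stack and building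
-- the output back-to-front; return values proved equal on all inputs.

-- ===== PORT A =====
-- inner loop: for j in range(i+1, len(s)): collect digits, break at the first non-digit
def negInnerA (s : List Char) (js : List Int) (number : List Char) : List Char :=
  match js with
  | [] => number
  | j :: rest =>
    match PySem.List.pyGet? s j with
    | some c => if PySem.Chars.isdigit c then negInnerA s rest (number ++ [c]) else number
    | none => number   -- unreachable: j is always in range

-- outer loop: for i in range(len(s)): at each '-', build number and append int(number)*-1
def negOuterA (s : List Char) (is_ : List Int) (acc : List Int) : List Int :=
  match is_ with
  | [] => acc
  | i :: rest =>
    match PySem.List.pyGet? s i with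
    | some c =>
      if c = '-' then
        let number := negInnerA s (PySem.List.pyRange (i + 1) (s.length : Int) 1) []
        if number ≠ [] then
          match PySem.Int.ofChars? number with   -- int(number); none is unreachable (digit run)
          | some n => negOuterA s rest (acc ++ [n * (-1)])
          | none => negOuterA s rest acc
        else negOuterA s rest acc
      else negOuterA s rest acc
    | none => acc   -- unreachable: i is always in range

def NegativeNumberInStrings (s : String) : List Int :=
  negOuterA s.toList (PySem.List.pyRange 0 (s.toList.length : Int) 1) []

-- ===== PORT B =====
-- one step of Source B's loop body over (res, digits); ch is the current character
def negRevStepB (st : List Int × List Char) (ch : Char) : List Int × List Char :=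
  if PySem.Chars.isdigit ch then (st.1, st.2 ++ [ch])        -- digits.append(ch)
  else
    (if ch = '-' ∧ st.2 ≠ [] then
       match PySem.Int.ofChars? st.2.reverse with            -- int(''.join(reversed(digits))); none unreachable (digit run)
       | some n => st.1 ++ [-n]
       | none => st.1
     else st.1,
     [])                                                     -- digits = []

def NegativeNumberInStrings_alt (s : String) : List Int :=
  (s.toList.reverse.foldl negRevStepB ([], [])).1.reverse    -- for ch in reversed(s); res.reverse()

-- ===== PRECONDITION & SPEC =====
def Spec_NegativeNumberInStrings (s : String) (out : List Int) : Prop := out = NegativeNumberInStrings_alt s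
instance (s : String) (out : List Int) : Decidable (Spec_NegativeNumberInStrings s out) := by unfold Spec_NegativeNumberInStrings; infer_instance

-- ===== CLAIM (what is proved, stated in full; the proofs are below) =====
def Claim_equal_NegativeNumberInStrings : Prop := ∀ (s : String), Dom_NegativeNumberInStrings s → Spec_NegativeNumberInStrings s (NegativeNumberInStrings s)

-- ===== LEMMAS AND PROOFS =====

-- common specification: at each '-' emit the negation of the following digit run (if nonempty)
def emitNeg (run : List Char) : List Int :=
  if run = [] then [] else
    match PySem.Int.ofChars? run with
    | some n => [-n]
    | none => []

def gspec : List Char → List Int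
  | [] => []
  | c :: rest => (if c = '-' then emitNeg (rest.takeWhile PySem.Chars.isdigit) else []) ++ gspec rest

-- ---- A-side: the nested index loops compute gspec ----

theorem negInnerA_eq (suf : List Char) : ∀ (pre number : List Char),
    negInnerA (pre ++ suf) (PySem.List.pyRange (pre.length : Int) ((pre ++ suf).length : Int) 1) number
      = number ++ suf.takeWhile PySem.Chars.isdigit := by
  induction suf with
  | nil =>
    intro pre number
    rw [PySem.List.pyRange_one_eq_nil (by simp)]
    simp [negInnerA]
  | cons c rest ih =>
    intro pre number
    rw [PySem.List.pyRange_one_cons (by simp)]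
    simp only [negInnerA, PySem.List.pyGet?_append_length]
    by_cases hd : PySem.Chars.isdigit c
    · rw [if_pos hd]
      have h1 : pre ++ c :: rest = (pre ++ [c]) ++ rest := by simp
      have h2 : (pre.length : Int) + 1 = ((pre ++ [c]).length : Int) := by simp
      rw [h1, h2, ih (pre ++ [c]) (number ++ [c])]
      simp [hd]
    · rw [if_neg hd]
      simp [hd]

theorem negOuterA_eq (suf : List Char) : ∀ (pre : List Char) (acc : List Int),
    negOuterA (pre ++ suf) (PySem.List.pyRange (pre.length : Int) ((pre ++ suf).length : Int) 1) acc
      = acc ++ gspec suf := by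
  induction suf with
  | nil =>
    intro pre acc
    rw [PySem.List.pyRange_one_eq_nil (by simp)]
    simp [negOuterA, gspec]
  | cons c rest ih =>
    intro pre acc
    rw [PySem.List.pyRange_one_cons (by simp)]
    simp only [negOuterA, PySem.List.pyGet?_append_length]
    have h1 : pre ++ c :: rest = (pre ++ [c]) ++ rest := by simp
    have h2 : (pre.length : Int) + 1 = ((pre ++ [c]).length : Int) := by simp
    by_cases hc : c = '-'
    · rw [if_pos hc]
      have hnum : negInnerA (pre ++ c :: rest)
          (PySem.List.pyRange ((pre.length : Int) + 1) (((pre ++ c :: rest).length : Nat) : Int) 1) []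
          = rest.takeWhile PySem.Chars.isdigit := by
        rw [h1, h2]
        have := negInnerA_eq rest (pre ++ [c]) []
        simpa using this
      rw [hnum]
      by_cases hne : rest.takeWhile PySem.Chars.isdigit = []
      · rw [hne]
        simp only [ne_eq, not_true_eq_false, if_false]
        rw [h1, h2, ih (pre ++ [c]) acc]
        simp [gspec, hc, hne, emitNeg]
      · rw [if_pos (by simpa using hne)]
        split
        next n hof =>
          rw [h1, h2, ih (pre ++ [c]) (acc ++ [n * (-1)])]
          simp [gspec, hc, emitNeg, hne, hof]
        next hof =>
          rw [h1, h2, ih (pre ++ [c]) acc]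
          simp [gspec, hc, emitNeg, hne, hof]
    · rw [if_neg hc]
      rw [h1, h2, ih (pre ++ [c]) acc]
      simp [gspec, hc]

theorem portA_eq_gspec (s : String) : NegativeNumberInStrings s = gspec s.toList := by
  have := negOuterA_eq s.toList [] []
  simpa [NegativeNumberInStrings] using this

-- ---- B-side: the right-to-left fold maintains (reversed output so far, reversed digit run) ----

theorem isdigit_ne_dash {c : Char} (h : PySem.Chars.isdigit c = true) : c ≠ '-' := by
  simp [PySem.Chars.isdigit] at h
  rintro rfl
  revert h; decide

-- invariant: folding from the right over l yields the reversed gspec and the reversed leading digit run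
theorem foldr_negRevStepB (l : List Char) :
    l.foldr (fun c st => negRevStepB st c) ([], [])
      = ((gspec l).reverse, (l.takeWhile PySem.Chars.isdigit).reverse) := by
  induction l with
  | nil => simp [gspec]
  | cons c rest ih =>
    simp only [List.foldr_cons, ih]
    by_cases hd : PySem.Chars.isdigit c
    · have hc : c ≠ '-' := isdigit_ne_dash hd
      simp [negRevStepB, hd, gspec, hc, List.takeWhile_cons_of_pos hd]
    · simp only [negRevStepB, hd]
      by_cases hc : c = '-'
      · subst hc
        by_cases hne : rest.takeWhile PySem.Chars.isdigit = []
        · simp [gspec, hne, emitNeg, (by decide : PySem.Chars.isdigit '-' = false)]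
        · have hcond : ('-' : Char) = '-' ∧ (rest.takeWhile PySem.Chars.isdigit).reverse ≠ [] := by
            simpa using hne
          rw [if_pos hcond]
          simp only [List.reverse_reverse]
          simp only [gspec, emitNeg, if_neg hne]
          cases hof : PySem.Int.ofChars? (rest.takeWhile PySem.Chars.isdigit) with
          | some n => simp [List.takeWhile_cons_of_neg hd]
          | none => simp [List.takeWhile_cons_of_neg hd]
      · have hcond : ¬ (c = '-' ∧ (rest.takeWhile PySem.Chars.isdigit).reverse ≠ []) := by
          intro h; exact hc h.1
        rw [if_neg hcond]
        simp [gspec, hc, List.takeWhile_cons_of_neg hd]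

theorem portB_eq_gspec (s : String) : NegativeNumberInStrings_alt s = gspec s.toList := by
  unfold NegativeNumberInStrings_alt
  rw [List.foldl_reverse]
  rw [foldr_negRevStepB]
  simp

-- ===== VERDICT (by name: the statement is the Claim_ definition above) =====
theorem NegativeNumberInStrings_spec : Claim_equal_NegativeNumberInStrings := by
  intro s _
  unfold Spec_NegativeNumberInStrings
  rw [portA_eq_gspec, portB_eq_gspec]
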